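-- pv_equiv track=rewrite | github.com/kim-seonwoo/codetree-TILs | 240807/최단 Run Length 인코딩/shortest-run-length-encoding.py | find_min_rle_length
-- ===== SOURCE A (Python) =====
-- def right_shift(s, k):
--     # 오른쪽으로 k번 shift
--     return s[-k:] + s[:-k]
--
-- def run_length_encoding(s):
--     if not s:
--         return 0
--
--     encoded_length = 0
--     current_char = s[0]
--     count = 1
--
--     for char in s[1:]:
--         if char == current_char:
--             count += 1
--         else:
--             encoded_length += 1 + len(str(count))
--             current_char = char
--             count = 1
--
--     encoded_length += 1 + len(str(count))
--     return encoded_length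
--
-- def find_min_rle_length(s):
--     n = len(s)
--     min_length = float('inf')
--
--     for k in range(n):
--         shifted_string = right_shift(s, k)
--         rle_length = run_length_encoding(shifted_string)
--         if rle_length < min_length:
--             min_length = rle_length
--
--     return min_length
-- ===== SOURCE B (Python) =====
-- def find_min_rle_length(s):
--     # Best rotation cuts the circular string at a run boundary: splitting a run of
--     # length a+b costs 2+len(str(a))+len(str(b)) >= 1+len(str(a+b)), so the answer
--     # is simply the circular run-length-encoding length, computed in one pass.
--     runs = []
--     i, n = 0, len(s)
--     while i < n:
--         j = i
--         while j < n and s[j] == s[i]: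
--             j += 1
--         runs.append(j - i)
--         i = j
--     if len(runs) > 1 and s[0] == s[-1]:
--         runs[0] += runs.pop()
--     return sum(1 + len(str(r)) for r in runs)
-- ===== Notes on version B (the rewrite author's own statement) =====
-- stated objective: faster
-- what changed: Instead of computing the RLE length of every rotation (O(n) rotations x O(n) scan), B decomposes the string into circular runs in one pass and returns their encoded length, which provably equals the minimum over all rotations because splitting a run at the cut never shortens the encoding.
-- outside the precondition, e.g. on find_min_rle_length(''): A returns inf, B returns 0
import Mathlib
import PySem

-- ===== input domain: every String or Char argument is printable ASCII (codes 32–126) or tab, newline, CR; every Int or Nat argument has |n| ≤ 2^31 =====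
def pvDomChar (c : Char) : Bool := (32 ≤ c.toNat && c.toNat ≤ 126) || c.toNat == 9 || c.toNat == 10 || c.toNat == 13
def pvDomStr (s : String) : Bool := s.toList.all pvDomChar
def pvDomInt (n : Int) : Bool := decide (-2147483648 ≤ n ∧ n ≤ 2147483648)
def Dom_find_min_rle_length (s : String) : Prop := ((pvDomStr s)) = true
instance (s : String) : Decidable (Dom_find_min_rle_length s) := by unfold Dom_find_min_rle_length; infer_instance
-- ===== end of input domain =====

-- B replaces A's try-every-rotation O(n^2) scan by one O(n) circular run decomposition
-- (the minimum over rotations is the circular RLE length); equivalence proved below.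

-- ===== PORT A =====
-- def right_shift(s, k): return s[-k:] + s[:-k]
def right_shiftA (cs : List Char) (k : Int) : List Char :=
  PySem.List.slice cs (some (-k)) none ++ PySem.List.slice cs none (some (-k))

-- def run_length_encoding(s): … ; len(str(count)) is ported as (PySem.Int.toChars count).length
def run_length_encodingA (cs : List Char) : Int :=
  match cs with
  | [] => 0
  | c0 :: rest =>
    let st := rest.foldl
      (fun (st : Int × Char × Int) ch =>
        let (acc, cur, cnt) := st
        if ch = cur then (acc, cur, cnt + 1)
        else (acc + 1 + ((PySem.Int.toChars cnt).length : Int), ch, 1))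
      (0, c0, 1)
    st.1 + 1 + ((PySem.Int.toChars st.2.2).length : Int)

-- min_length starts as the float infinity, modelled as 'none'; Python returns that float only for s = ""
-- (excluded by Pre_), where the port returns 0.
def find_min_rle_length (s : String) : Int :=
  let cs := s.toList
  let n : Int := cs.length
  let res := (PySem.List.pyRange 0 n 1).foldl
    (fun (min_length : Option Int) k =>
      let shifted := right_shiftA cs k
      let rle_length := run_length_encodingA shifted
      match min_length with
      | none => some rle_length
      | some m => if rle_length < m then some rle_length else some m)
    none
  res.getD 0

-- ===== PORT B =====
-- the two nested 'while' loops of Source B, one run at a time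
def bRuns : List Char → List Int
  | [] => []
  | c :: rest =>
    (((rest.takeWhile (fun x => x == c)).length : Int) + 1)
      :: bRuns (rest.dropWhile (fun x => x == c))
termination_by cs => cs.length
decreasing_by
  have := List.length_dropWhile_le (fun x => x == c) rest
  simp; omega

def find_min_rle_length_alt (s : String) : Int :=
  let cs := s.toList
  let runs := bRuns cs
  let runs2 :=
    if 1 < runs.length ∧ cs.headD ' ' = cs.getLastD ' ' then
      (runs.headD 0 + runs.getLastD 0) :: runs.tail.dropLast
    else runs
  (runs2.map (fun r => 1 + ((PySem.Int.toChars r).length : Int))).sum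

-- ===== PRECONDITION & SPEC =====
-- Pre_ excludes only the empty string, on which A returns the float infinity — a float,
-- not a value of the declared int result type; B returns 0 there.
def Pre_find_min_rle_length (s : String) : Prop := s.toList ≠ []
instance (s : String) : Decidable (Pre_find_min_rle_length s) := by
  unfold Pre_find_min_rle_length; infer_instance
def pvWitness_find_min_rle_length : String := "aabcc"

def Spec_find_min_rle_length (s : String) (out : Int) : Prop := out = find_min_rle_length_alt s
instance (s : String) (out : Int) : Decidable (Spec_find_min_rle_length s out) := by unfold Spec_find_min_rle_length; infer_instance

-- ===== CLAIM (what is proved, stated in full; the proofs are below) =====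
def Claim_equal_find_min_rle_length : Prop := ∀ (s : String), Dom_find_min_rle_length s → Pre_find_min_rle_length s → Spec_find_min_rle_length s (find_min_rle_length s)

-- ===== LEMMAS AND PROOFS =====

/-! Proof layer: run decompositions.  `runsOf` is the (char, length) run list of a
string; `runSum` its RLE length; `cycSum` the circular RLE length (first and last
run merged when their chars agree).  We prove
(1) A's inner loop computes `runSum ∘ runsOf`;
(2) B computes `cycSum ∘ runsOf`;
(3) `cycSum ∘ runsOf` is invariant under rotation;
(4) `cycSum ≤ runSum`, with equality when the end chars differ (or ≤ 1 run);
(5) hence the minimum over all rotations is exactly B's value. -/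

def pvDfl : Char × Int := (' ', 0)

def pvW (k : Int) : Int := 1 + ((PySem.Int.toChars k).length : Int)

def consRun (c : Char) : List (Char × Int) → List (Char × Int)
  | [] => [(c, 1)]
  | (x, k) :: R => if c = x then (x, k + 1) :: R else (c, 1) :: (x, k) :: R

def runsOf : List Char → List (Char × Int)
  | [] => []
  | c :: t => consRun c (runsOf t)

def snocRun : List (Char × Int) → Char → List (Char × Int)
  | [], c => [(c, 1)]
  | [(x, k)], c => if x = c then [(x, k + 1)] else [(x, k), (c, 1)]
  | p :: q :: R, c => p :: snocRun (q :: R) c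

def runSum (R : List (Char × Int)) : Int := (R.map (fun p => pvW p.2)).sum

def cycSum (R : List (Char × Int)) : Int :=
  if 2 ≤ R.length ∧ (R.headD pvDfl).1 = (R.getLastD pvDfl).1 then
    pvW ((R.headD pvDfl).2 + (R.getLastD pvDfl).2) + runSum (R.tail.dropLast)
  else runSum R

-- digit-length subadditivity --------------------------------------------------

theorem pvToDigitsCore_shape : ∀ (fuel n : Nat) (ds : List Char), n < fuel →
    ∃ e, (Nat.toDigitsCore 10 fuel n ds).length = ds.length + e ∧ 0 < e ∧ n < 10 ^ e := by
  intro fuel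
  induction fuel with
  | zero => intro n ds h; omega
  | succ f ih =>
    intro n ds h
    by_cases h0 : n / 10 = 0
    · refine ⟨1, ?_, by omega, by omega⟩
      simp [Nat.toDigitsCore, h0]
    · have hn : 0 < n := by
        rcases Nat.eq_zero_or_pos n with h' | h'
        · exact absurd (by simp [h']) h0
        · exact h'
      have hlt : n / 10 < f := by
        have := Nat.div_lt_self hn (by norm_num : 1 < 10)
        omega
      obtain ⟨e, he, hepos, hebnd⟩ := ih (n / 10) ((n % 10).digitChar :: ds) hlt
      refine ⟨e + 1, ?_, by omega, ?_⟩
      · simp only [Nat.toDigitsCore, h0]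
        simp at he ⊢
        omega
      · have h9 : n ≤ 10 * (n / 10) + 9 := by omega
        calc n ≤ 10 * (n / 10) + 9 := h9
          _ < 10 * (n / 10) + 10 := by omega
          _ = 10 * (n / 10 + 1) := by ring
          _ ≤ 10 * 10 ^ e := by
            have : n / 10 + 1 ≤ 10 ^ e := hebnd
            omega
          _ = 10 ^ (e + 1) := by ring

theorem pvToDigits_shape (n : Nat) :
    n < 10 ^ (Nat.toDigits 10 n).length ∧ 0 < (Nat.toDigits 10 n).length := by
  obtain ⟨e, he, hepos, hbnd⟩ := pvToDigitsCore_shape (n + 1) n [] (by omega)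
  unfold Nat.toDigits
  simp at he
  rw [he]
  exact ⟨hbnd, hepos⟩

theorem pvW_add_le (a b : Int) (ha : 1 ≤ a) (hb : 1 ≤ b) :
    pvW (a + b) ≤ pvW a + pvW b := by
  have hchars : ∀ (x : Int), 1 ≤ x → PySem.Int.toChars x = Nat.toDigits 10 x.toNat := by
    intro x hx
    simp only [PySem.Int.toChars, if_neg (by omega : ¬ x < 0)]
  rw [pvW, pvW, pvW, hchars a ha, hchars b hb, hchars (a + b) (by omega)]
  set da := (Nat.toDigits 10 a.toNat).length with hda
  set db := (Nat.toDigits 10 b.toNat).length with hdb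
  have hsa : a.toNat < 10 ^ da ∧ 0 < da := pvToDigits_shape a.toNat
  have hsb : b.toNat < 10 ^ db ∧ 0 < db := pvToDigits_shape b.toNat
  have habn : (a + b).toNat = a.toNat + b.toNat := by omega
  have hbound : (a + b).toNat < 10 ^ (da + db) := by
    have h1 : (10:Nat) ^ 1 ≤ 10 ^ da := Nat.pow_le_pow_right (by norm_num) (by omega)
    have h2 : (10:Nat) ^ 1 ≤ 10 ^ db := Nat.pow_le_pow_right (by norm_num) (by omega)
    have hmul : 10 ^ da + 10 ^ db ≤ 10 ^ da * 10 ^ db :=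
      Nat.add_le_mul (by omega : 2 ≤ 10 ^ da) (by omega : 2 ≤ 10 ^ db)
    calc (a + b).toNat = a.toNat + b.toNat := habn
      _ < 10 ^ da + 10 ^ db := by omega
      _ ≤ 10 ^ da * 10 ^ db := hmul
      _ = 10 ^ (da + db) := (pow_add 10 da db).symm
  have := Nat.toDigits_length 10 (a + b).toNat (da + db) (by omega) hbound
  omega

-- basic runSum / cycSum computations ------------------------------------------

theorem runSum_cons (p : Char × Int) (R : List (Char × Int)) :
    runSum (p :: R) = pvW p.2 + runSum R := by
  simp [runSum]

theorem runSum_concat (M : List (Char × Int)) (q : Char × Int) :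
    runSum (M ++ [q]) = runSum M + pvW q.2 := by
  simp [runSum]

theorem pvHeadD_concat (p q : Char × Int) (M : List (Char × Int)) :
    (p :: M ++ [q]).headD pvDfl = p := rfl

theorem pvGetLastD_concat (p q : Char × Int) (M : List (Char × Int)) :
    (p :: M ++ [q]).getLastD pvDfl = q := by
  have : p :: M ++ [q] = (p :: M) ++ [q] := by simp
  rw [this, List.getLastD_concat]

theorem pvLen_concat (p q : Char × Int) (M : List (Char × Int)) :
    (p :: M ++ [q]).length = M.length + 2 := by simp

theorem pvTailDropLast_concat (p q : Char × Int) (M : List (Char × Int)) :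
    (p :: M ++ [q]).tail.dropLast = M := by
  simp

theorem cycSum_concat_merge (p q : Char × Int) (M : List (Char × Int)) (h : p.1 = q.1) :
    cycSum (p :: M ++ [q]) = pvW (p.2 + q.2) + runSum M := by
  rw [cycSum, if_pos]
  · rw [pvHeadD_concat, pvGetLastD_concat, pvTailDropLast_concat]
  · rw [pvHeadD_concat, pvGetLastD_concat, pvLen_concat]
    exact ⟨by omega, h⟩

theorem cycSum_concat_nomerge (p q : Char × Int) (M : List (Char × Int)) (h : p.1 ≠ q.1) :
    cycSum (p :: M ++ [q]) = pvW p.2 + runSum M + pvW q.2 := by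
  rw [cycSum, if_neg]
  · have : p :: M ++ [q] = p :: (M ++ [q]) := by simp
    rw [this, runSum_cons, runSum_concat]; ring
  · rw [pvHeadD_concat, pvGetLastD_concat]
    rintro ⟨-, h'⟩; exact h h'

theorem cycSum_short (R : List (Char × Int)) (h : R.length ≤ 1) : cycSum R = runSum R := by
  rw [cycSum, if_neg]; rintro ⟨h2, -⟩; omega

-- runsOf structure -------------------------------------------------------------

theorem runsOf_ne_nil (c : Char) (t : List Char) : runsOf (c :: t) ≠ [] := by
  show consRun c (runsOf t) ≠ []
  rcases runsOf t with _ | ⟨⟨x, k⟩, R⟩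
  · simp [consRun]
  · simp only [consRun]
    split <;> simp

theorem runsOf_head (c : Char) (t : List Char) :
    ((runsOf (c :: t)).headD pvDfl).1 = c := by
  show ((consRun c (runsOf t)).headD pvDfl).1 = c
  rcases runsOf t with _ | ⟨⟨x, k⟩, R⟩
  · rfl
  · simp only [consRun]
    split
    · next h => simp [h]
    · simp

theorem consRun_getLastD (c : Char) (R : List (Char × Int)) (h : R ≠ []) :
    ((consRun c R).getLastD pvDfl).1 = (R.getLastD pvDfl).1 := by
  rcases R with _ | ⟨⟨x, k⟩, R'⟩
  · exact absurd rfl h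
  · simp only [consRun]
    split
    · rcases R' with _ | ⟨p, R''⟩ <;> simp
    · simp

theorem runsOf_last : ∀ (t : List Char), t ≠ [] →
    ((runsOf t).getLastD pvDfl).1 = t.getLastD ' ' := by
  intro t
  induction t with
  | nil => intro h; exact absurd rfl h
  | cons c t' ih =>
    intro _
    rcases eq_or_ne t' [] with rfl | ht'
    · rfl
    · have hne : runsOf t' ≠ [] := by
        rcases t' with _ | ⟨d, u⟩
        · exact absurd rfl ht'
        · exact runsOf_ne_nil d u
      show ((consRun c (runsOf t')).getLastD pvDfl).1 = _
      rw [consRun_getLastD c _ hne, ih ht']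
      rcases t' with _ | ⟨d, u⟩
      · exact absurd rfl ht'
      · simp

theorem runsOf_valid : ∀ (t : List Char), ∀ p ∈ runsOf t, 1 ≤ p.2 := by
  intro t
  induction t with
  | nil => intro p hp; simp [runsOf] at hp
  | cons c t' ih =>
    intro p hp
    have hp' : p ∈ consRun c (runsOf t') := hp
    rcases hR : runsOf t' with _ | ⟨⟨x, k⟩, R'⟩
    · rw [hR] at hp'; simp [consRun] at hp'; simp [hp']
    · rw [hR] at hp'
      simp only [consRun] at hp'
      have hk : 1 ≤ k := by
        have := ih (x, k) (by rw [hR]; exact List.mem_cons_self)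
        simpa using this
      split at hp'
      · rcases List.mem_cons.1 hp' with rfl | hmem
        · simpa using by omega
        · exact ih p (by rw [hR]; exact List.mem_cons_of_mem _ hmem)
      · rcases List.mem_cons.1 hp' with rfl | hmem
        · simp
        · exact ih p (by rw [hR]; exact hmem)

theorem cycSum_le_runSum (R : List (Char × Int)) (h : ∀ p ∈ R, 1 ≤ p.2) :
    cycSum R ≤ runSum R := by
  rcases R with _ | ⟨p, T⟩
  · simp [cycSum]
  · rcases eq_or_ne T [] with rfl | hT
    · rw [cycSum_short _ (by simp)]
    · have hdec : p :: T = p :: T.dropLast ++ [T.getLast hT] := by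
        simp [List.dropLast_append_getLast hT]
      set q := T.getLast hT with hq
      by_cases hc : p.1 = q.1
      · rw [hdec, cycSum_concat_merge _ _ _ hc]
        have : runSum (p :: T.dropLast ++ [q]) = pvW p.2 + runSum T.dropLast + pvW q.2 := by
          have : p :: T.dropLast ++ [q] = p :: (T.dropLast ++ [q]) := by simp
          rw [this, runSum_cons, runSum_concat]; ring
        rw [this]
        have h1 : 1 ≤ p.2 := h p List.mem_cons_self
        have h2 : 1 ≤ q.2 := h q (List.mem_cons_of_mem _ (T.getLast_mem hT))
        have := pvW_add_le p.2 q.2 h1 h2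
        omega
      · rw [hdec, cycSum_concat_nomerge _ _ _ hc]
        have : p :: T.dropLast ++ [q] = p :: (T.dropLast ++ [q]) := by simp
        rw [this, runSum_cons, runSum_concat]; omega

theorem cycSum_eq_of_ends_ne (R : List (Char × Int))
    (h : ((R.headD pvDfl).1 = (R.getLastD pvDfl).1) → False) : cycSum R = runSum R := by
  rw [cycSum, if_neg]; rintro ⟨-, h'⟩; exact h h'

-- single-step rotation invariance ----------------------------------------------

theorem snocRun_cons_cons (p q : Char × Int) (R : List (Char × Int)) (c : Char) :
    snocRun (p :: q :: R) c = p :: snocRun (q :: R) c := rfl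

theorem snocRun_concat : ∀ (M : List (Char × Int)) (e : Char) (j : Int) (c : Char),
    snocRun (M ++ [(e, j)]) c = M ++ (if e = c then [(e, j + 1)] else [(e, j), (c, 1)]) := by
  intro M
  induction M with
  | nil =>
    intro e j c
    show snocRun [(e, j)] c = _
    simp only [snocRun, List.nil_append]
  | cons p M' ih =>
    intro e j c
    rcases M' with _ | ⟨q, M''⟩
    · rcases p with ⟨x, k⟩
      show snocRun ((x,k) :: [(e,j)]) c = _
      rw [snocRun_cons_cons]
      have := ih e j c
      simp only [List.nil_append] at this
      simp [this]
    · show snocRun (p :: (q :: M'' ++ [(e,j)])) c = _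
      have : q :: M'' ++ [(e, j)] = q :: (M'' ++ [(e, j)]) := by simp
      rw [show p :: (q :: M'' ++ [(e,j)]) = p :: q :: (M'' ++ [(e,j)]) by simp]
      rw [snocRun_cons_cons]
      rw [show q :: (M'' ++ [(e,j)]) = (q :: M'') ++ [(e,j)] by simp]
      rw [ih e j c]
      simp

theorem consRun_snocRun (x c : Char) : ∀ (R : List (Char × Int)),
    consRun x (snocRun R c) = snocRun (consRun x R) c := by
  intro R
  rcases R with _ | ⟨⟨y, k⟩, R'⟩
  · show consRun x [(c, 1)] = snocRun [(x, 1)] c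
    simp only [consRun, snocRun]
    by_cases h : x = c
    · subst h; simp
    · simp [h]
  · rcases R' with _ | ⟨⟨z, m⟩, R''⟩
    · show consRun x (snocRun [(y, k)] c) = snocRun (consRun x [(y, k)]) c
      by_cases hyc : y = c <;> by_cases hxy : x = y
      · subst hyc; subst hxy
        simp [snocRun, consRun]
      · simp only [snocRun, if_pos hyc]
        subst hyc
        simp [consRun, hxy, snocRun]
      · subst hxy
        simp [snocRun, consRun, hyc]
      · simp [snocRun, consRun, hyc, hxy]
    · -- R = (y,k) :: (z,m) :: R''
      rw [show snocRun ((y,k) :: (z,m) :: R'') c = (y,k) :: snocRun ((z,m) :: R'') c from rfl]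
      rcases hs : snocRun ((z, m) :: R'') c with _ | ⟨w, W⟩
      · exfalso
        rcases R'' with _ | ⟨r, R₃⟩
        · simp only [snocRun] at hs; split at hs <;> simp_all
        · rw [snocRun_cons_cons] at hs; simp at hs
      · simp only [consRun]
        by_cases hxy : x = y
        · simp only [if_pos hxy]
          rw [snocRun_cons_cons, hs]
        · simp only [if_neg hxy]
          rw [snocRun_cons_cons, snocRun_cons_cons, hs]

theorem runsOf_concat : ∀ (t : List Char) (c : Char),
    runsOf (t ++ [c]) = snocRun (runsOf t) c := by
  intro t
  induction t with
  | nil => intro c; rfl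
  | cons x t' ih =>
    intro c
    show consRun x (runsOf (t' ++ [c])) = snocRun (consRun x (runsOf t')) c
    rw [ih c, consRun_snocRun]

theorem cycSum_consRun_snocRun (c : Char) (R : List (Char × Int)) :
    cycSum (consRun c R) = cycSum (snocRun R c) := by
  rcases R with _ | ⟨⟨y, k⟩, T⟩
  · rfl
  · rcases eq_or_ne T [] with rfl | hT
    · simp only [consRun, snocRun]
      by_cases h : c = y
      · subst h; simp
      · rw [if_neg h, if_neg (fun h' => h h'.symm)]
        have h1 : [(c,1),(y,k)] = (c,1) :: [] ++ [(y,k)] := by simp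
        have h2 : [(y,k),(c,1)] = (y,k) :: [] ++ [(c,1)] := by simp
        rw [h1, h2, cycSum_concat_nomerge _ _ _ (by simpa using h),
          cycSum_concat_nomerge _ _ _ (by simpa using fun h' => h h'.symm)]
        ring
    · obtain ⟨M, e, j, rfl⟩ : ∃ M e j, T = M ++ [(e, j)] :=
        ⟨T.dropLast, (T.getLast hT).1, (T.getLast hT).2, by
          simpa using (List.dropLast_append_getLast hT).symm⟩
      have hcons : consRun c ((y, k) :: (M ++ [(e, j)]))
          = if c = y then (y, k + 1) :: M ++ [(e, j)]
            else (c, 1) :: ((y, k) :: M) ++ [(e, j)] := by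
        simp only [consRun]; split <;> simp
      have hsnoc1 : snocRun ((y, k) :: (M ++ [(e, j)])) c
          = (y, k) :: snocRun (M ++ [(e, j)]) c := by
        rcases M with _ | ⟨p, M'⟩ <;> rfl
      by_cases hcy : c = y <;> by_cases hec : e = c
      · -- merge at both ends: same merged run
        rw [hcons, if_pos hcy, hsnoc1, snocRun_concat, if_pos hec]
        rw [cycSum_concat_merge (y, k+1) (e, j) M (by simp [← hcy, hec]),
          show (y,k) :: (M ++ [(e, j+1)]) = (y,k) :: M ++ [(e, j+1)] from rfl,
          cycSum_concat_merge (y, k) (e, j+1) M (by simp [← hcy, hec])]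
        rw [show (y, k+1).2 + (e, j).2 = k + 1 + j from rfl,
          show (y, k).2 + (e, j+1).2 = k + (j + 1) from rfl,
          show k + 1 + j = k + (j + 1) from by ring]
      · -- c = y, e ≠ c : left no merge, right merges into head
        rw [hcons, if_pos hcy, hsnoc1, snocRun_concat, if_neg hec]
        rw [cycSum_concat_nomerge (y, k+1) (e, j) M
          (by simp only []; rw [← hcy]; exact fun h' => hec h'.symm)]
        rw [show (y,k) :: (M ++ [(e,j),(c,1)]) = (y,k) :: (M ++ [(e,j)]) ++ [(c,1)] from by simp]
        rw [cycSum_concat_merge (y, k) (c, 1) (M ++ [(e,j)]) (by simp [hcy]), runSum_concat]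
        rw [show (y, k+1).2 = k + 1 from rfl, show (y,k).2 + (c,1).2 = k + 1 from rfl]
        ring
      · -- c ≠ y, e = c : left merges into head, right no merge
        rw [hcons, if_neg hcy, hsnoc1, snocRun_concat, if_pos hec]
        rw [show (c,1) :: ((y,k) :: M) ++ [(e,j)] = (c,1) :: ((y,k) :: M) ++ [(e,j)] from rfl,
          cycSum_concat_merge (c, 1) (e, j) ((y,k) :: M) (by simp [hec]), runSum_cons]
        rw [show (y,k) :: (M ++ [(e, j+1)]) = (y,k) :: M ++ [(e, j+1)] from rfl,
          cycSum_concat_nomerge (y, k) (e, j+1) M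
            (by simp only []; rw [hec]; exact fun h' => hcy h'.symm)]
        rw [show (c,1).2 + (e,j).2 = 1 + j from rfl, show (e, j+1).2 = j + 1 from rfl,
          show (1 : Int) + j = j + 1 from by ring]
        ring
      · -- no merges anywhere
        rw [hcons, if_neg hcy, hsnoc1, snocRun_concat, if_neg hec]
        rw [cycSum_concat_nomerge (c, 1) (e, j) ((y,k) :: M)
          (by simp only []; exact fun h' => hec h'.symm), runSum_cons]
        rw [show (y,k) :: (M ++ [(e,j),(c,1)]) = (y,k) :: (M ++ [(e,j)]) ++ [(c,1)] from by simp]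
        rw [cycSum_concat_nomerge (y, k) (c, 1) (M ++ [(e,j)])
          (by simp only []; exact fun h' => hcy h'.symm), runSum_concat]
        ring

theorem cycSum_rot1 (t : List Char) (c : Char) :
    cycSum (runsOf (t ++ [c])) = cycSum (runsOf (c :: t)) := by
  rw [runsOf_concat]
  exact (cycSum_consRun_snocRun c (runsOf t)).symm

theorem cycSum_swap : ∀ (v u : List Char),
    cycSum (runsOf (u ++ v)) = cycSum (runsOf (v ++ u)) := by
  intro v
  induction v with
  | nil => intro u; simp
  | cons x v' ih =>
    intro u
    calc cycSum (runsOf (u ++ x :: v'))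
        = cycSum (runsOf ((u ++ [x]) ++ v')) := by simp
      _ = cycSum (runsOf (v' ++ (u ++ [x]))) := ih (u ++ [x])
      _ = cycSum (runsOf ((v' ++ u) ++ [x])) := by simp
      _ = cycSum (runsOf (x :: (v' ++ u))) := cycSum_rot1 _ x
      _ = cycSum (runsOf ((x :: v') ++ u)) := by simp

-- A's RLE loop = runSum ∘ runsOf -----------------------------------------------

def prepRun (c : Char) (k : Int) : List (Char × Int) → List (Char × Int)
  | [] => [(c, k)]
  | (x, j) :: R => if c = x then (x, j + k) :: R else (c, k) :: (x, j) :: R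

theorem rleA_loop : ∀ (rest : List Char) (acc : Int) (cur : Char) (cnt : Int),
    (let st := rest.foldl
      (fun (st : Int × Char × Int) ch =>
        let (a, cu, cn) := st
        if ch = cu then (a, cu, cn + 1)
        else (a + 1 + ((PySem.Int.toChars cn).length : Int), ch, 1))
      (acc, cur, cnt)
     st.1 + 1 + ((PySem.Int.toChars st.2.2).length : Int))
    = acc + runSum (prepRun cur cnt (runsOf rest)) := by
  intro rest
  induction rest with
  | nil =>
    intro acc cur cnt
    simp only [List.foldl_nil, runsOf, prepRun, runSum, List.map, List.sum_cons,
      List.sum_nil, pvW]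
    ring
  | cons x xs ih =>
    intro acc cur cnt
    simp only [List.foldl_cons]
    by_cases hx : x = cur
    · rw [if_pos hx]
      rw [ih acc cur (cnt + 1)]
      congr 1
      -- prepRun cur (cnt+1) (runsOf xs) = prepRun cur cnt (consRun x (runsOf xs)) with x = cur
      subst hx
      show runSum (prepRun x (cnt+1) (runsOf xs)) = runSum (prepRun x cnt (consRun x (runsOf xs)))
      rcases runsOf xs with _ | ⟨⟨y, m⟩, R⟩
      · simp only [consRun, prepRun]
        split_ifs with h
        · rw [show (1 : Int) + cnt = cnt + 1 from by ring]
        · exact absurd trivial h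
      · simp only [consRun]
        by_cases hxy : x = y
        · rw [if_pos hxy]
          simp only [prepRun, if_pos hxy]
          rw [show m + 1 + cnt = m + (cnt + 1) from by ring]
        · rw [if_neg hxy]
          simp only [prepRun, if_neg hxy]
          split_ifs with h
          · rw [show (1 : Int) + cnt = cnt + 1 from by ring]
          · exact absurd trivial h
    · rw [if_neg hx]
      rw [ih (acc + 1 + ((PySem.Int.toChars cnt).length : Int)) x 1]
      -- prepRun x 1 (runsOf xs) = consRun x (runsOf xs), and prepending (cur, cnt)
      have h1 : prepRun x 1 (runsOf xs) = consRun x (runsOf xs) := by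
        rcases runsOf xs with _ | ⟨⟨y, m⟩, R⟩ <;> rfl
      have h2 : prepRun cur cnt (consRun x (runsOf xs)) = (cur, cnt) :: consRun x (runsOf xs) := by
        rcases runsOf xs with _ | ⟨⟨y, m⟩, R⟩
        · simp only [consRun, prepRun]
          rw [if_neg (show ¬ cur = x from fun h => hx h.symm)]
        · simp only [consRun]
          by_cases hxy : x = y
          · rw [if_pos hxy]
            simp only [prepRun]
            rw [if_neg (show ¬ cur = y from by rw [← hxy]; exact fun h => hx h.symm)]
          · rw [if_neg hxy]
            simp only [prepRun]
            rw [if_neg (show ¬ cur = x from fun h => hx h.symm)]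
      show _ = acc + runSum (prepRun cur cnt (consRun x (runsOf xs)))
      rw [h1, h2, runSum_cons, pvW]
      ring

theorem rleA_eq_runSum (cs : List Char) : run_length_encodingA cs = runSum (runsOf cs) := by
  rcases cs with _ | ⟨c, rest⟩
  · rfl
  · show (let st := rest.foldl _ (0, c, 1); st.1 + 1 + ((PySem.Int.toChars st.2.2).length : Int))
      = runSum (runsOf (c :: rest))
    rw [rleA_loop rest 0 c 1]
    have : prepRun c 1 (runsOf rest) = consRun c (runsOf rest) := by
      rcases runsOf rest with _ | ⟨⟨y, m⟩, R⟩ <;> rfl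
    rw [this]
    show 0 + runSum (consRun c (runsOf rest)) = runSum (consRun c (runsOf rest))
    ring

-- B = cycSum ∘ runsOf ------------------------------------------------------------

theorem runsOf_cons_eq : ∀ (rest : List Char) (c : Char),
    runsOf (c :: rest)
      = (c, ((rest.takeWhile (fun x => x == c)).length : Int) + 1)
          :: runsOf (rest.dropWhile (fun x => x == c)) := by
  intro rest
  induction rest with
  | nil => intro c; rfl
  | cons x xs ih =>
    intro c
    by_cases hx : x = c
    · subst hx
      rw [show runsOf (x :: x :: xs) = consRun x (runsOf (x :: xs)) from rfl, ih x]
      simp only [consRun, List.takeWhile_cons, List.dropWhile_cons, beq_self_eq_true,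
        if_true]
      simp only [List.length_cons]
      refine congrArg₂ _ ?_ rfl
      refine congrArg _ ?_
      push_cast
      ring
    · rw [show runsOf (c :: x :: xs) = consRun c (runsOf (x :: xs)) from rfl, ih x]
      simp only [consRun, if_neg (show ¬ c = x from fun h => hx h.symm)]
      have hb : (x == c) = false := by simp [hx]
      rw [← ih x]
      simp [hb]

theorem bRuns_eq : ∀ (cs : List Char), bRuns cs = (runsOf cs).map (·.2) := by
  intro cs
  induction cs using bRuns.induct with
  | case1 => simp [bRuns, runsOf]
  | case2 c rest ih =>
    rw [bRuns, runsOf_cons_eq rest c]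
    simp only [List.map_cons]
    rw [ih]

theorem pvGetLastD_map_snd (R : List (Char × Int)) :
    (R.map (·.2)).getLastD 0 = (R.getLastD pvDfl).2 := by
  induction R with
  | nil => rfl
  | cons p R' ih =>
    rcases R' with _ | ⟨q, R''⟩
    · rfl
    · simpa using ih

theorem pvHeadD_map_snd (R : List (Char × Int)) :
    (R.map (·.2)).headD 0 = (R.headD pvDfl).2 := by
  rcases R with _ | ⟨p, R'⟩ <;> rfl

theorem pvSum_map_snd (R : List (Char × Int)) :
    ((R.map (·.2)).map (fun r => 1 + ((PySem.Int.toChars r).length : Int))).sum = runSum R := by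
  rw [List.map_map]
  rfl

theorem alt_eq_cycSum (s : String) : find_min_rle_length_alt s = cycSum (runsOf s.toList) := by
  show (let cs := s.toList
        let runs := bRuns cs
        let runs2 := if 1 < runs.length ∧ cs.headD ' ' = cs.getLastD ' ' then
            (runs.headD 0 + runs.getLastD 0) :: runs.tail.dropLast
          else runs
        (runs2.map (fun r => 1 + ((PySem.Int.toChars r).length : Int))).sum)
      = cycSum (runsOf s.toList)
  set cs := s.toList with hcs
  rcases hc : cs with _ | ⟨c, t⟩
  · simp [bRuns, cycSum, runSum, runsOf]
  · simp only [bRuns_eq]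
    set R := runsOf (c :: t) with hR
    have hRne : R ≠ [] := runsOf_ne_nil c t
    have hhead : ((c :: t).headD ' ') = (R.headD pvDfl).1 := by
      rw [hR, runsOf_head]; rfl
    have hlast : ((c :: t).getLastD ' ') = (R.getLastD pvDfl).1 := by
      rw [hR, runsOf_last (c :: t) (by simp)]
    by_cases hcond : 1 < (R.map (·.2)).length ∧ (c :: t).headD ' ' = (c :: t).getLastD ' '
    · rw [if_pos hcond]
      have hlen : 2 ≤ R.length := by
        have := hcond.1; simpa using this
      have hchar : (R.headD pvDfl).1 = (R.getLastD pvDfl).1 := by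
        rw [← hhead, ← hlast]; exact hcond.2
      rw [cycSum, if_pos ⟨hlen, hchar⟩]
      simp only [List.map_cons, List.sum_cons]
      rw [pvHeadD_map_snd, pvGetLastD_map_snd, ← List.map_tail, ← List.map_dropLast,
        pvSum_map_snd]
      rfl
    · rw [if_neg hcond]
      rw [cycSum, if_neg ?hne]
      · exact pvSum_map_snd R
      case hne =>
        rintro ⟨h2, hch⟩
        exact hcond ⟨by simpa using h2, by rw [hhead, hlast]; exact hch⟩

-- rotations ----------------------------------------------------------------------

theorem right_shiftA_eq (cs : List Char) (k : Int) (h0 : 0 ≤ k) (h1 : k ≤ (cs.length : Int)) :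
    right_shiftA cs k = cs.drop (cs.length - k.toNat) ++ cs.take (cs.length - k.toNat) := by
  rcases eq_or_ne k 0 with rfl | hk
  · simp [right_shiftA, PySem.List.slice_none_none, PySem.List.slice_to cs (by norm_num : (0:Int) ≤ 0)]
  · obtain ⟨n, rfl⟩ : ∃ n : Nat, k = (n : Int) := ⟨k.toNat, by omega⟩
    rw [right_shiftA, PySem.List.slice_from_neg_natCast cs n (by omega),
      PySem.List.slice_to_neg_natCast cs n (by omega)]
    simp

-- the min-fold --------------------------------------------------------------------

def pvStep (g : Int → Int) (st : Option Int) (k : Int) : Option Int :=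
  match st with
  | none => some (g k)
  | some m => if g k < m then some (g k) else some m

def pvG (cs : List Char) (k : Int) : Int := run_length_encodingA (right_shiftA cs k)

theorem pvFoldMin (g : Int → Int) : ∀ (L : List Int) (m : Int),
    ∃ m', L.foldl (pvStep g) (some m) = some m'
      ∧ m' ≤ m ∧ (m' = m ∨ ∃ k ∈ L, g k = m') ∧ (∀ k ∈ L, m' ≤ g k) := by
  intro L
  induction L with
  | nil => intro m; exact ⟨m, rfl, le_refl m, Or.inl rfl, by simp⟩
  | cons k0 L' ih =>
    intro m
    simp only [List.foldl_cons, pvStep]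
    by_cases h : g k0 < m
    · obtain ⟨m', hfold, hle, hor, hall⟩ := ih (g k0)
      rw [if_pos h]
      refine ⟨m', hfold, by omega, ?_, ?_⟩
      · rcases hor with rfl | ⟨k, hk, hgk⟩
        · exact Or.inr ⟨k0, List.mem_cons_self, rfl⟩
        · exact Or.inr ⟨k, List.mem_cons_of_mem _ hk, hgk⟩
      · intro k hk
        rcases List.mem_cons.1 hk with rfl | hk'
        · omega
        · exact hall k hk'
    · obtain ⟨m', hfold, hle, hor, hall⟩ := ih m
      rw [if_neg h]
      refine ⟨m', hfold, hle, ?_, ?_⟩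
      · rcases hor with rfl | ⟨k, hk, hgk⟩
        · exact Or.inl rfl
        · exact Or.inr ⟨k, List.mem_cons_of_mem _ hk, hgk⟩
      · intro k hk
        rcases List.mem_cons.1 hk with rfl | hk'
        · omega
        · exact hall k hk'

-- not-all-equal strings split at a run boundary -----------------------------------

theorem allEq_or_split : ∀ (cs : List Char),
    cs.IsChain (· = ·) ∨ ∃ a b : List Char, cs = a ++ b ∧ a ≠ [] ∧ b ≠ [] ∧
      a.getLastD ' ' ≠ b.headD ' ' := by
  intro cs
  induction cs with
  | nil => exact Or.inl (by simp)
  | cons c t ih =>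
    rcases t with _ | ⟨d, t'⟩
    · exact Or.inl (by simp)
    · by_cases hcd : c = d
      · rcases ih with hch | ⟨a, b, hab, ha, hb, hne⟩
        · exact Or.inl (List.IsChain.cons_cons hcd hch)
        · refine Or.inr ⟨c :: a, b, by rw [hab]; rfl, by simp, hb, ?_⟩
          rcases a with _ | ⟨a0, a'⟩
          · exact absurd rfl ha
          · simpa using hne
      · exact Or.inr ⟨[c], d :: t', rfl, by simp, by simp, by simpa using hcd⟩

theorem pvDropWhile_of_chain : ∀ (c : Char) (t : List Char), (c :: t).IsChain (· = ·) →
    t.dropWhile (fun x => x == c) = [] := by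
  intro c t
  induction t generalizing c with
  | nil => intro _; rfl
  | cons d t' ih =>
    intro h
    have hcd : c = d := List.IsChain.rel_head h
    have ht : (d :: t').IsChain (· = ·) := h.tail
    have hch : (c :: t').IsChain (· = ·) := by rw [hcd]; exact ht
    simp only [List.dropWhile_cons]
    rw [show (d == c) = true from by simp [hcd.symm]]
    simp only [if_true]
    exact ih c hch

theorem pvGetLastD_ne_nil {α : Type} (l : List α) (h : l ≠ []) (d d' : α) :
    l.getLastD d = l.getLastD d' := by
  rw [← List.dropLast_append_getLast h, List.getLastD_concat, List.getLastD_concat]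

theorem pvGetLastD_append {α : Type} (l m : List α) (d : α) (h : m ≠ []) :
    (l ++ m).getLastD d = m.getLastD d := by
  induction l with
  | nil => rfl
  | cons x l' ih =>
    rw [List.cons_append, List.getLastD_cons,
      pvGetLastD_ne_nil (l' ++ m) (by simp [h]) x d, ih]

theorem runsOf_len_le_one_of_chain : ∀ (cs : List Char), cs.IsChain (· = ·) →
    (runsOf cs).length ≤ 1 := by
  intro cs h
  rcases cs with _ | ⟨c, t⟩
  · simp [runsOf]
  · rw [runsOf_cons_eq, pvDropWhile_of_chain c t h]
    simp [runsOf]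

-- ===== VERDICT (by name: the statement is the Claim_ definition above) =====
theorem pvA_eq_fold (s : String) :
    find_min_rle_length s
      = ((PySem.List.pyRange 0 ((s.toList.length : Nat) : Int) 1).foldl
          (pvStep (pvG s.toList)) none).getD 0 := by
  rfl

theorem find_min_rle_length_spec : Claim_equal_find_min_rle_length := by
  intro s _ hpre
  show find_min_rle_length s = find_min_rle_length_alt s
  have hne : s.toList ≠ [] := hpre
  have hn : 0 < ((s.toList.length : Nat) : Int) := by
    have := List.length_pos_of_ne_nil hne
    exact_mod_cast this
  -- per-rotation lower bound
  have hglow : ∀ k : Int, 0 ≤ k → k < ((s.toList.length : Nat) : Int) →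
      cycSum (runsOf s.toList) ≤ pvG s.toList k := by
    intro k hk0 hk1
    have hsh := right_shiftA_eq s.toList k hk0 (le_of_lt hk1)
    rw [pvG, hsh, rleA_eq_runSum]
    have h1 := cycSum_le_runSum
      (runsOf (s.toList.drop (s.toList.length - k.toNat) ++ s.toList.take (s.toList.length - k.toNat)))
      (runsOf_valid _)
    have h2 := cycSum_swap (s.toList.take (s.toList.length - k.toNat))
      (s.toList.drop (s.toList.length - k.toNat))
    rw [List.take_append_drop] at h2
    omega
  -- some rotation achieves the circular RLE length
  have hach : ∃ k : Int, 0 ≤ k ∧ k < ((s.toList.length : Nat) : Int) ∧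
      pvG s.toList k = cycSum (runsOf s.toList) := by
    rcases allEq_or_split s.toList with hch | ⟨a, b, hab, ha, hb, hneq⟩
    · refine ⟨0, le_refl 0, hn, ?_⟩
      have h0 : right_shiftA s.toList 0 = s.toList := by
        rw [right_shiftA_eq s.toList 0 (le_refl 0) (by omega)]
        rw [show (0 : Int).toNat = 0 from rfl, Nat.sub_zero, List.drop_length,
          List.take_length, List.nil_append]
      rw [pvG, h0, rleA_eq_runSum]
      exact (cycSum_short _ (runsOf_len_le_one_of_chain _ hch)).symm
    · have hal : 0 < a.length := List.length_pos_of_ne_nil ha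
      have hbl : 0 < b.length := List.length_pos_of_ne_nil hb
      have hlen : s.toList.length = a.length + b.length := by rw [hab]; simp
      refine ⟨(b.length : Int), by positivity, by omega, ?_⟩
      rw [pvG, right_shiftA_eq _ _ (by positivity) (by omega)]
      rw [show s.toList.length - ((b.length : Nat) : Int).toNat = a.length from by
        rw [show ((b.length : Nat) : Int).toNat = b.length from by simp]; omega]
      rw [hab, List.drop_left, List.take_left, rleA_eq_runSum]
      have hends : ((runsOf (b ++ a)).headD pvDfl).1 = ((runsOf (b ++ a)).getLastD pvDfl).1 → False := by
        intro hcontra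
        rcases hbeq : b with _ | ⟨b0, bt⟩
        · exact hb hbeq
        · have hh : ((runsOf (b0 :: (bt ++ a))).headD pvDfl).1 = b0 := runsOf_head _ _
          have hba : b ++ a ≠ [] := by simp [hbeq]
          have hl : ((runsOf (b ++ a)).getLastD pvDfl).1 = (b ++ a).getLastD ' ' :=
            runsOf_last _ hba
          rw [pvGetLastD_append _ _ _ ha] at hl
          rw [hbeq] at hl hcontra
          rw [List.cons_append] at hl hcontra
          rw [hh, hl] at hcontra
          apply hneq
          rw [hbeq]
          rw [hcontra]
          rfl
      have hnm := cycSum_eq_of_ends_ne _ hends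
      rw [← hnm, cycSum_swap a b]
  -- run the min-fold
  obtain ⟨m', hfold, hle, hor, hall⟩ :=
    pvFoldMin (pvG s.toList) (PySem.List.pyRange (0 + 1) ((s.toList.length : Nat) : Int) 1)
      (pvG s.toList 0)
  have hA2 : find_min_rle_length s = m' := by
    rw [pvA_eq_fold, PySem.List.pyRange_one_cons hn, List.foldl_cons,
      show pvStep (pvG s.toList) none 0 = some (pvG s.toList 0) from rfl, hfold]
    rfl
  obtain ⟨k0, hk00, hk01, hk0v⟩ := hach
  have hup : m' ≤ cycSum (runsOf s.toList) := by
    rw [← hk0v]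
    rcases eq_or_ne k0 0 with rfl | hk0ne
    · exact hle
    · exact hall k0 (PySem.List.mem_pyRange_one.2 ⟨by omega, hk01⟩)
  have hdown : cycSum (runsOf s.toList) ≤ m' := by
    rcases hor with rfl | ⟨k, hk, hgk⟩
    · exact hglow 0 (le_refl 0) hn
    · have hk' := PySem.List.mem_pyRange_one.1 hk
      rw [← hgk]
      exact hglow k (by omega) hk'.2
  rw [hA2, alt_eq_cycSum]
  omega
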